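-- pv_equiv track=rewrite | github.com/alfaceor/programming-examples | python/Classes/SimulResult.py | getLimits
-- ===== SOURCE A (Python) =====
-- def getLimits(arr, amin, amax):
--   # Array must be sorted from min to max
--   i_min=0
--   i_max=len(arr)-1
--   #if arr[i_min] > amin or arr[i_max] < amax:
--   #  print "Out of bounds!!"
--   #  exit()
--   ii    = i_min
--   while (arr[ii] <= amin ):
--     ii = ii+1
--     i_min = ii
--
--   ii    = i_max
--   while (arr[ii] >= amax ):
--     ii = ii-1
--     i_max = ii
--
--   return i_min, i_max
-- ===== SOURCE B (Python) =====
-- def getLimits(arr, amin, amax):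
--     # one comprehension pass per bound: collect qualifying indices, pick first/last
--     idx = [i for i, x in enumerate(arr) if x > amin]
--     jdx = [i for i, x in enumerate(arr) if x < amax]
--     return idx[0], jdx[-1]
-- ===== Notes on version B (the rewrite author's own statement) =====
-- stated objective: simpler
-- what changed: Replaces the two sequential while-loop pointer scans (the second of which walks into negative-index wraparound) by two list comprehensions collecting the qualifying indices and picking the first / last one.
import Mathlib
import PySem

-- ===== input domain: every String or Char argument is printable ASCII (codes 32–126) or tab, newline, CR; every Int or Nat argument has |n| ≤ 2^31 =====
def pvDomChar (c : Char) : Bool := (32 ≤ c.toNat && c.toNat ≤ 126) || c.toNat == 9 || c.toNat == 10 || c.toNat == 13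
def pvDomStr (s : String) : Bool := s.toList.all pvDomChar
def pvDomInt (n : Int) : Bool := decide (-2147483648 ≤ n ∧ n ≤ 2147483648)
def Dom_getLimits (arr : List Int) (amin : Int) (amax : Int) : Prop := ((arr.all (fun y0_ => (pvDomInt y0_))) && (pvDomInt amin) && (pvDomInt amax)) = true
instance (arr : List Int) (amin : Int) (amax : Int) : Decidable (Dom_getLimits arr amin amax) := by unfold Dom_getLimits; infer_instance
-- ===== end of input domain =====

-- B replaces A's two while-loop pointer scans by index comprehensions (first/last qualifying index); objective: simpler.

-- ===== PORT A =====
-- first while loop: ii walks up while arr[ii] <= amin (IndexError past the end = none; unreachable under Pre_)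
def getLimitsLoopLo (arr : List Int) (amin : Int) : Nat → Int → Int
  | 0, ii => ii
  | fuel+1, ii =>
    match PySem.List.pyGet? arr ii with
    | none => ii
    | some x => if x ≤ amin then getLimitsLoopLo arr amin fuel (ii+1) else ii

-- second while loop: ii walks down while arr[ii] >= amax (Python negative indices wrap; under Pre_ it stops at index ≥ 0)
def getLimitsLoopHi (arr : List Int) (amax : Int) : Nat → Int → Int
  | 0, ii => ii
  | fuel+1, ii =>
    match PySem.List.pyGet? arr ii with
    | none => ii
    | some x => if amax ≤ x then getLimitsLoopHi arr amax fuel (ii-1) else ii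

def getLimits (arr : List Int) (amin : Int) (amax : Int) : Int × Int :=
  (getLimitsLoopLo arr amin (arr.length + 1) 0,
   getLimitsLoopHi arr amax (arr.length + 1) ((arr.length : Int) - 1))

-- ===== PORT B =====
def getLimits_alt (arr : List Int) (amin : Int) (amax : Int) : Int × Int :=
  let idx := ((PySem.List.enumerate arr 0).filter (fun p => amin < p.2)).map (fun p => p.1)
  let jdx := ((PySem.List.enumerate arr 0).filter (fun p => p.2 < amax)).map (fun p => p.1)
  match PySem.List.pyGet? idx 0, PySem.List.pyGet? jdx (-1) with
  | some a, some b => (a, b)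
  | _, _ => (0, 0)   -- idx[0] / jdx[-1] raise IndexError on empty list; unreachable under Pre_

-- ===== PRECONDITION & SPEC =====
-- A raises IndexError when no element exceeds amin (first loop runs off the end) or no element is
-- below amax (second loop wraps through negative indices and runs off); Pre_ excludes exactly those.
def Pre_getLimits (arr : List Int) (amin : Int) (amax : Int) : Prop :=
  (∃ x ∈ arr, amin < x) ∧ (∃ x ∈ arr, x < amax)
instance (arr : List Int) (amin : Int) (amax : Int) : Decidable (Pre_getLimits arr amin amax) := by unfold Pre_getLimits; infer_instance

def pvWitness_getLimits : List Int × Int × Int := ([1, 2, 3], 1, 3)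

def Spec_getLimits (arr : List Int) (amin : Int) (amax : Int) (out : Int × Int) : Prop := out = getLimits_alt arr amin amax
instance (arr : List Int) (amin : Int) (amax : Int) (out : Int × Int) : Decidable (Spec_getLimits arr amin amax out) := by unfold Spec_getLimits; infer_instance

-- ===== CLAIM (what is proved, stated in full; the proofs are below) =====
def Claim_equal_getLimits : Prop := ∀ (arr : List Int) (amin : Int) (amax : Int), Dom_getLimits arr amin amax → Pre_getLimits arr amin amax → Spec_getLimits arr amin amax (getLimits arr amin amax)

-- ===== LEMMAS AND PROOFS =====

-- proof-only spec: first index (offset s) whose element satisfies P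
def firstIdx? (P : Int → Bool) : List Int → Int → Option Int
  | [], _ => none
  | x :: xs, s => if P x then some s else firstIdx? P xs (s + 1)

-- proof-only spec: last index (offset s) whose element satisfies P
def lastIdx? (P : Int → Bool) : List Int → Int → Option Int
  | [], _ => none
  | x :: xs, s =>
    match lastIdx? P xs (s + 1) with
    | some j => some j
    | none => if P x then some s else none

theorem firstIdx?_isSome (P : Int → Bool) (l : List Int) (s : Int)
    (h : ∃ x ∈ l, P x) : ∃ j, firstIdx? P l s = some j := by
  induction l generalizing s with
  | nil => simp at h
  | cons x xs ih =>
    by_cases hx : P x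
    · exact ⟨s, by simp [firstIdx?, hx]⟩
    · obtain ⟨y, hy, hPy⟩ := h
      rcases List.mem_cons.mp hy with hy | hy
      · subst hy; exact absurd hPy hx
      · obtain ⟨j, hj⟩ := ih (s := s + 1) ⟨y, hy, hPy⟩
        exact ⟨j, by simp [firstIdx?, hx, hj]⟩

theorem lastIdx?_isSome (P : Int → Bool) (l : List Int) (s : Int)
    (h : ∃ x ∈ l, P x) : ∃ j, lastIdx? P l s = some j := by
  induction l generalizing s with
  | nil => simp at h
  | cons x xs ih =>
    by_cases hxs : ∃ y ∈ xs, P y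
    · obtain ⟨j, hj⟩ := ih (s := s + 1) hxs
      exact ⟨j, by simp [lastIdx?, hj]⟩
    · obtain ⟨y, hy, hPy⟩ := h
      rcases List.mem_cons.mp hy with hy | hy
      · subst hy
        cases hnone : lastIdx? P xs (s + 1) with
        | some j => exact ⟨j, by simp [lastIdx?, hnone]⟩
        | none => exact ⟨s, by simp [lastIdx?, hnone, hPy]⟩
      · exact absurd ⟨y, hy, hPy⟩ hxs

theorem lastIdx?_append_singleton (P : Int → Bool) (l : List Int) (x : Int) (s : Int) :
    lastIdx? P (l ++ [x]) s = if P x then some (s + l.length) else lastIdx? P l s := by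
  induction l generalizing s with
  | nil => by_cases hx : P x <;> simp [lastIdx?, hx]
  | cons y ys ih =>
    by_cases hx : P x
    · simp only [List.cons_append, lastIdx?, ih, hx, if_pos]
      have : s + 1 + (ys.length : Int) = s + (ys.length + 1 : Nat) := by push_cast; ring
      simp [this]
    · simp [List.cons_append, lastIdx?, ih, hx]

-- B's idx list: head = firstIdx?
theorem head?_filter_enum (P : Int → Bool) (l : List Int) (s : Int) :
    (((PySem.List.enumerate l s).filter (fun p => P p.2)).map (fun p => p.1)).head? =
      firstIdx? P l s := by
  induction l generalizing s with
  | nil => simp [PySem.List.enumerate_nil, firstIdx?]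
  | cons x xs ih =>
    by_cases hx : P x <;>
      simp [PySem.List.enumerate_cons, hx, firstIdx?, ih]

-- B's jdx list: getLast = lastIdx?
theorem getLast?_filter_enum (P : Int → Bool) (l : List Int) (s : Int) :
    (((PySem.List.enumerate l s).filter (fun p => P p.2)).map (fun p => p.1)).getLast? =
      lastIdx? P l s := by
  induction l generalizing s with
  | nil => simp [PySem.List.enumerate_nil, lastIdx?]
  | cons x xs ih =>
    rw [PySem.List.enumerate_cons]
    cases htail : lastIdx? P xs (s + 1) with
    | some j =>
      have hne : ((PySem.List.enumerate xs (s + 1)).filter (fun p => P p.2)).map (fun p => p.1) ≠ [] := by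
        intro hnil
        rw [← ih (s := s + 1), hnil] at htail
        simp at htail
      have hcons : ∀ (a : Int) (L : List Int), L = ((PySem.List.enumerate xs (s + 1)).filter (fun p => P p.2)).map (fun p => p.1) →
          (a :: L).getLast? = some j := by
        intro a L hL
        have : (a :: L) = [a] ++ L := rfl
        rw [this, List.getLast?_append_of_ne_nil _ (hL ▸ hne), hL, ih (s := s + 1), htail]
      by_cases hx : P x
      · simp only [List.filter_cons, hx, if_pos, lastIdx?, htail, List.map_cons]
        exact hcons s _ rfl
      · simp only [lastIdx?, htail]
        have hfil : List.filter (fun p => P p.2) ((s, x) :: PySem.List.enumerate xs (s + 1)) =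
            List.filter (fun p => P p.2) (PySem.List.enumerate xs (s + 1)) := by
          simp [hx]
        rw [hfil, ih (s := s + 1), htail]
    | none =>
      have hnil : ((PySem.List.enumerate xs (s + 1)).filter (fun p => P p.2)).map (fun p => p.1) = [] := by
        cases hc : ((PySem.List.enumerate xs (s + 1)).filter (fun p => P p.2)).map (fun p => p.1) with
        | nil => rfl
        | cons a as =>
          have := ih (s := s + 1)
          rw [hc, htail] at this
          cases as <;> simp_all
      by_cases hx : P x <;>
        simp [hx, lastIdx?, htail, hnil]

-- A's first loop computes firstIdx? on the remaining suffix
theorem loopLo_eq (arr : List Int) (amin : Int) :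
    ∀ (fuel k : Nat) (j : Int), arr.length - k < fuel →
      firstIdx? (fun x => amin < x) (arr.drop k) (k : Int) = some j →
      getLimitsLoopLo arr amin fuel (k : Int) = j := by
  intro fuel
  induction fuel with
  | zero => intro k j h; omega
  | succ n ih =>
    intro k j hfuel hfi
    have hk : k < arr.length := by
      by_contra hk
      rw [List.drop_eq_nil_of_le (by omega)] at hfi
      simp [firstIdx?] at hfi
    have hdrop : arr.drop k = arr[k] :: arr.drop (k + 1) :=
      List.drop_eq_getElem_cons hk
    rw [hdrop] at hfi
    have hget : PySem.List.pyGet? arr (k : Int) = some arr[k] := by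
      rw [PySem.List.pyGet?_natCast]; simp [hk]
    by_cases hx : amin < arr[k]
    · simp only [firstIdx?, hx, decide_true, if_pos] at hfi
      simp only [getLimitsLoopLo, hget, if_neg (not_le.mpr hx)]
      exact Option.some.inj hfi
    · simp only [firstIdx?, hx, decide_false, Bool.false_eq_true] at hfi
      simp only [getLimitsLoopLo, hget, if_pos (le_of_not_gt hx)]
      have hc : (k : Int) + 1 = ((k + 1 : Nat) : Int) := by push_cast; ring
      rw [hc]
      exact ih (k + 1) j (by omega) (by exact_mod_cast hfi)

-- A's second loop computes lastIdx? on the prefix up to ii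
theorem loopHi_eq (arr : List Int) (amax : Int) :
    ∀ (fuel k : Nat) (j : Int), k < arr.length → k < fuel →
      lastIdx? (fun x => x < amax) (arr.take (k + 1)) 0 = some j →
      getLimitsLoopHi arr amax fuel (k : Int) = j := by
  intro fuel
  induction fuel with
  | zero => intro k j _ h; omega
  | succ n ih =>
    intro k j hk hfuel hla
    have htake : arr.take (k + 1) = arr.take k ++ [arr[k]] := by
      rw [List.take_add_one]
      simp [List.getElem?_eq_getElem hk]
    rw [htake, lastIdx?_append_singleton] at hla
    have hget : PySem.List.pyGet? arr (k : Int) = some arr[k] := by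
      rw [PySem.List.pyGet?_natCast]; simp [hk]
    by_cases hx : arr[k] < amax
    · simp only [hx, decide_true, if_pos] at hla
      simp only [getLimitsLoopHi, hget, if_neg (not_le.mpr hx)]
      have hl : (0 : Int) + ((arr.take k).length : Int) = (k : Int) := by
        simp [List.length_take, Nat.min_eq_left (by omega : k ≤ arr.length)]
      rw [hl] at hla
      exact Option.some.inj hla
    · simp only [hx, decide_false, Bool.false_eq_true] at hla
      simp only [getLimitsLoopHi, hget, if_pos (not_lt.mp hx)]
      have hk0 : k ≠ 0 := by
        intro h0
        subst h0
        simp [lastIdx?] at hla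
      have : (k : Int) - 1 = ((k - 1 : Nat) : Int) := by omega
      rw [this]
      have hk1 : k - 1 + 1 = k := by omega
      exact ih (k - 1) j (by omega) (by omega) (by rw [hk1]; exact hla)

-- ===== VERDICT (by name: the statement is the Claim_ definition above) =====
theorem getLimits_spec : Claim_equal_getLimits := by
  intro arr amin amax _ hpre
  obtain ⟨hlo, hhi⟩ := hpre
  obtain ⟨jlo, hjlo⟩ := firstIdx?_isSome (fun x => amin < x) arr 0
    (by obtain ⟨x, hx, h⟩ := hlo; exact ⟨x, hx, by simpa using h⟩)
  obtain ⟨jhi, hjhi⟩ := lastIdx?_isSome (fun x => x < amax) arr 0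
    (by obtain ⟨x, hx, h⟩ := hhi; exact ⟨x, hx, by simpa using h⟩)
  have harrne : arr ≠ [] := by
    intro h; subst h; simp at hlo
  have hlen : 0 < arr.length := List.length_pos_iff.mpr harrne
  unfold Spec_getLimits getLimits getLimits_alt
  -- B's side
  have hheadB :
      PySem.List.pyGet? (((PySem.List.enumerate arr 0).filter (fun p => amin < p.2)).map (fun p => p.1)) 0 = some jlo := by
    rw [PySem.List.pyGet?_zero, ← List.head?_eq_getElem?]
    exact (head?_filter_enum (fun x => decide (amin < x)) arr 0).trans hjlo
  have hlastB :
      PySem.List.pyGet? (((PySem.List.enumerate arr 0).filter (fun p => p.2 < amax)).map (fun p => p.1)) (-1) = some jhi := by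
    rw [PySem.List.pyGet?_neg_one]
    exact (getLast?_filter_enum (fun x => decide (x < amax)) arr 0).trans hjhi
  simp only [hheadB, hlastB]
  -- A's side
  have hA1 : getLimitsLoopLo arr amin (arr.length + 1) 0 = jlo := by
    have := loopLo_eq arr amin (arr.length + 1) 0 jlo (by omega)
      (by simpa using hjlo)
    simpa using this
  have hA2 : getLimitsLoopHi arr amax (arr.length + 1) ((arr.length : Int) - 1) = jhi := by
    have hcast : ((arr.length : Int) - 1) = ((arr.length - 1 : Nat) : Int) := by omega
    rw [hcast]
    refine loopHi_eq arr amax (arr.length + 1) (arr.length - 1) jhi (by omega) (by omega) ?_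
    have : arr.length - 1 + 1 = arr.length := by omega
    rw [this, List.take_length]
    exact hjhi
  rw [hA1, hA2]
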